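-- pv_equiv track=rewrite | github.com/adinashby-vanier-college/programming-in-science-assignment-2-prekshaptl | Assignment2.py | max_two_in_list
-- ===== SOURCE A (Python) =====
-- def max_two_in_list(numbers):
--
--     max1 = max(numbers)
--
--     rest = []
--     for value in numbers:
--         if value != max1:
--             rest.append(value)
--
--     if rest:
--         max2 = max(rest)
--     else:
--         max2 = None
--
--     return (max1, max2)
-- ===== SOURCE B (Python) =====
-- def max_two_in_list(numbers):
--     max1 = max(numbers)
--     max2 = None
--     for v in numbers:
--         if v != max1 and (max2 is None or v > max2):
--             max2 = v
--     return (max1, max2)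
-- ===== Notes on version B (the rewrite author's own statement) =====
-- stated objective: simpler
-- what changed: Replaces A's build-an-intermediate-list-then-reduce (rest list plus a second max pass) with a single scan that maintains the running maximum of values strictly below max1 inline.
import Mathlib
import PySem

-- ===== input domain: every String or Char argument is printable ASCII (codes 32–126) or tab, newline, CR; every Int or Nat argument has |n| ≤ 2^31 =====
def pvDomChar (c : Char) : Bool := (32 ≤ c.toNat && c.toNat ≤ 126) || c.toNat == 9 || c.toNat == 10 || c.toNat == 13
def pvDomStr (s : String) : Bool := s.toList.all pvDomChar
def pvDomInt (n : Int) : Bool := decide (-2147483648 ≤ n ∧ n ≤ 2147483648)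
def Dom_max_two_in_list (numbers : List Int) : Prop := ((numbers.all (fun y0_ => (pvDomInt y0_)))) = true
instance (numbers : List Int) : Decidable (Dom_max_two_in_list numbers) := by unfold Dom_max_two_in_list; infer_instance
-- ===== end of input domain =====

-- B replaces A's intermediate "rest" list + second max pass by one inline running-max scan (simpler, O(1) extra space).

-- ===== PORT A =====
def max_two_in_list (numbers : List Int) : Int × Option Int :=
  let max1 := ((PySem.List.max? numbers (fun y => y)).getD 0)  -- under Pre_, numbers ≠ [] so max? = some …
  let rest := numbers.foldl (fun acc value => if value ≠ max1 then acc ++ [value] else acc) []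
  let max2 := if rest ≠ [] then PySem.List.max? rest (fun y => y) else none
  (max1, max2)

-- ===== PORT B =====
-- the loop body of B's scan ('if v != max1 and (max2 is None or v > max2): max2 = v')
def pvStepB (max1 : Int) (m : Option Int) (v : Int) : Option Int :=
  if v ≠ max1 ∧ (m.isNone ∨ m.any (fun m' => m' < v)) then some v else m

def max_two_in_list_alt (numbers : List Int) : Int × Option Int :=
  let max1 := ((PySem.List.max? numbers (fun y => y)).getD 0)
  let max2 := numbers.foldl (pvStepB max1) none
  (max1, max2)

-- ===== PRECONDITION & SPEC =====
-- Python's max(numbers) raises ValueError on the empty list, so A (and B) return on exactly the nonempty lists.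
def Pre_max_two_in_list (numbers : List Int) : Prop := numbers ≠ []
instance (numbers : List Int) : Decidable (Pre_max_two_in_list numbers) := by unfold Pre_max_two_in_list; infer_instance
def pvWitness_max_two_in_list : List Int := [3, 1, 3, 2]

def Spec_max_two_in_list (numbers : List Int) (out : Int × Option Int) : Prop := out = max_two_in_list_alt numbers
instance (numbers : List Int) (out : Int × Option Int) : Decidable (Spec_max_two_in_list numbers out) := by unfold Spec_max_two_in_list; infer_instance

-- ===== CLAIM (what is proved, stated in full; the proofs are below) =====
def Claim_equal_max_two_in_list : Prop := ∀ (numbers : List Int), Dom_max_two_in_list numbers → Pre_max_two_in_list numbers → Spec_max_two_in_list numbers (max_two_in_list numbers)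

-- ===== LEMMAS AND PROOFS =====

-- the pure running-max step B's fold reduces to on the kept elements
def pvRunMax (m : Option Int) (v : Int) : Option Int :=
  some (match m with | none => v | some a => max a v)

-- A's accumulation loop builds the filter of the list
theorem pv_restA (M : Int) (L : List Int) (acc : List Int) :
    L.foldl (fun acc v => if v ≠ M then acc ++ [v] else acc) acc
      = acc ++ L.filter (fun v => decide (v ≠ M)) := by
  induction L generalizing acc with
  | nil => simp
  | cons x t ih =>
    rw [List.foldl_cons, List.filter_cons]
    by_cases hx : x = M
    · simpa [hx] using ih acc
    · simpa [hx, List.append_assoc] using ih (acc ++ [x])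

-- B's fold over the whole list = running-max fold over the filtered list
theorem pv_fold_filter (M : Int) (L : List Int) (m : Option Int) :
    L.foldl (pvStepB M) m = (L.filter (fun v => decide (v ≠ M))).foldl pvRunMax m := by
  induction L generalizing m with
  | nil => rfl
  | cons x t ih =>
    rw [List.foldl_cons, List.filter_cons]
    by_cases hx : x = M
    · have h0 : pvStepB M m x = m := by simp [pvStepB, hx]
      have hd : (decide (x ≠ M)) = false := by simp [hx]
      rw [h0, hd]
      simp only [Bool.false_eq_true, if_false]
      exact ih m
    · have h1 : pvStepB M m x = pvRunMax m x := by
        cases m with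
        | none => simp [pvStepB, pvRunMax, hx]
        | some a =>
          simp only [pvStepB, pvRunMax, Option.isNone_some, Option.any_some]
          by_cases hav : a < x
          · simp [hx, hav, le_of_lt hav]
          · have : max a x = a := by omega
            simp [hx, hav, this]
      have hd : (decide (x ≠ M)) = true := by simp [hx]
      rw [h1, hd]
      simp only [if_true]
      rw [List.foldl_cons]
      exact ih (pvRunMax m x)

-- the running-max fold computes Python max? on its list
theorem pv_runmax_eq_max? (F : List Int) :
    F.foldl pvRunMax none = PySem.List.max? F (fun y => y) := by
  cases F with
  | nil => rfl
  | cons x t =>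
    rw [PySem.List.max?_id_cons]
    simp only [List.foldl, pvRunMax]
    have : ∀ (t : List Int) (a : Int), t.foldl pvRunMax (some a) = some (t.foldl max a) := by
      intro t
      induction t with
      | nil => intro a; rfl
      | cons y s ih => intro a; simp [List.foldl, pvRunMax, ih]
    exact this t x

-- A's branch on rest-empty is exactly max?
theorem pv_branch_eq (rest : List Int) :
    (if rest ≠ [] then PySem.List.max? rest (fun y => y) else none)
      = PySem.List.max? rest (fun y => y) := by
  by_cases h : rest = []
  · subst h
    simp only [ne_eq, not_true_eq_false, if_false]
    exact ((PySem.List.max?_eq_none_iff [] (fun y => y)).mpr rfl).symm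
  · simp [h]

-- ===== VERDICT (by name: the statement is the Claim_ definition above) =====
theorem max_two_in_list_spec : Claim_equal_max_two_in_list := by
  intro numbers _ _
  unfold Spec_max_two_in_list max_two_in_list max_two_in_list_alt
  simp only []
  rw [pv_restA, List.nil_append, pv_branch_eq, pv_fold_filter, pv_runmax_eq_max?]
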